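-- pv_equiv track=rewrite | github.com/mils8545/aoc2017python | 16/main.py | part2
-- ===== SOURCE A (Python) =====
-- from typing import List
--
-- class Instruction:
--     def __init__(self, name : str, args : List[str]) -> None:
--         self.name : str = name
--         self.args : List[str] = args
--     def __repr__(self) -> str:
--         return f"{self.name} {self.args}"
--     def __str__(self) -> str:
--         return f"{self.name} {self.args}"
--
-- def parseLines(lines : List[str]) -> List[Instruction]:
--     instructions : List[Instruction] = []
--     for part in lines[0].split(","):
--         instructions.append(Instruction(part[0], part[1:].split("/")))
--     return instructions
--
-- def part2(lines : List[str]) -> str: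
--     # Code the solution to part 2 here, returning the answer as a string
--     instructions : List[Instruction] = parseLines(lines)
--     programs : List[str] = [chr(i) for i in range(ord("a"), ord("p")+1)]
--     stateList : List[str] = []
--     runCount : int = 0
--     while not ("".join(programs) == "abcdefghijklmnop") or runCount == 0:
--         stateList.append("".join(programs))
--         for instruction in instructions:
--             if instruction.name == "s":
--                 programs = programs[-int(instruction.args[0]):] + programs[:-int(instruction.args[0])]
--             elif instruction.name == "x":
--                 programs[int(instruction.args[0])], programs[int(instruction.args[1])] = programs[int(instruction.args[1])], programs[int(instruction.args[0])]
--             elif instruction.name == "p":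
--                 aIndex : int = programs.index(instruction.args[0])
--                 bIndex : int = programs.index(instruction.args[1])
--                 programs[aIndex], programs[bIndex] = programs[bIndex], programs[aIndex]
--         runCount += 1
--
--     remainingRuns : int = 1000000000 % runCount
--     for i in range(remainingRuns):
--         for instruction in instructions:
--             if instruction.name == "s":
--                 programs = programs[-int(instruction.args[0]):] + programs[:-int(instruction.args[0])]
--             elif instruction.name == "x":
--                 programs[int(instruction.args[0])], programs[int(instruction.args[1])] = programs[int(instruction.args[1])], programs[int(instruction.args[0])]
--             elif instruction.name == "p":
--                 aIndex : int = programs.index(instruction.args[0])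
--                 bIndex : int = programs.index(instruction.args[1])
--                 programs[aIndex], programs[bIndex] = programs[bIndex], programs[aIndex]
--     result : str = "".join(programs)
--     return f"Password is {result}."
-- ===== SOURCE B (Python) =====
-- def part2(lines):
--     # Compose the whole dance into a position permutation (s/x) and a
--     # renaming permutation (p), then raise both to the 10**9-th power by
--     # squaring instead of detecting the cycle by repeated dancing.
--     pos = list(range(16))
--     ren = list(range(16))
--     for part in lines[0].split(","):
--         op = part[0]
--         args = part[1:].split("/")
--         if op == "s":
--             k = int(args[0])
--             pos = pos[-k:] + pos[:-k]
--         elif op == "x":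
--             i = int(args[0])
--             j = int(args[1])
--             pos[i], pos[j] = pos[j], pos[i]
--         elif op == "p":
--             a = ord(args[0]) - 97
--             b = ord(args[1]) - 97
--             ren = [b if v == a else a if v == b else v for v in ren]
--
--     def comp(p, q):
--         return [p[v] for v in q]
--
--     def pow_perm(p, n):
--         r = list(range(16))
--         while n > 0:
--             if n & 1:
--                 r = comp(r, p)
--             p = comp(p, p)
--             n >>= 1
--         return r
--
--     ptot = pow_perm(pos, 1000000000)
--     rtot = pow_perm(ren, 1000000000)
--     result = "".join(chr(97 + rtot[ptot[i]]) for i in range(16))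
--     return f"Password is {result}."
-- ===== Notes on version B (the rewrite author's own statement) =====
-- stated objective: alternative
-- what changed: B composes the whole dance once into a position permutation (s/x moves) and a renaming permutation (p moves) and raises both to the 10^9-th power by exponentiation-by-squaring, instead of A's dancing until the state repeats and then replaying 10^9 mod cycle-length extra dances.
import Mathlib
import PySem

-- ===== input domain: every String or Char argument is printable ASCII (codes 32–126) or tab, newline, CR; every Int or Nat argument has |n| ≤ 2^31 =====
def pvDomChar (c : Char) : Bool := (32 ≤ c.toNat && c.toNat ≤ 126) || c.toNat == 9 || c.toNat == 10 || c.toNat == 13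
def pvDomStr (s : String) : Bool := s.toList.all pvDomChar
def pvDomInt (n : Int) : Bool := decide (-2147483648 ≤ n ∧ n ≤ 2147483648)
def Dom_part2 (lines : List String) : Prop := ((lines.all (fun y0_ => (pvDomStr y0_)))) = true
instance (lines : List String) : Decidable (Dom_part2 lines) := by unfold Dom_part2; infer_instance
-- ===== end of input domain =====

-- B replaces A's run-until-the-state-repeats cycle detection by composing the dance into a
-- position permutation and a renaming permutation and raising both to the 10^9-th power by squaring.

-- ===== PORT A =====

-- parseLines: Instruction(part[0], part[1:].split("/")) as a (name, args) pair
def parseA (lines : List String) : Option (List (Char × List (List Char))) :=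
  (PySem.List.pyGet? lines 0).bind fun l0 =>
    (PySem.Chars.splitOn l0.toList [',']).mapM fun part =>
      (PySem.List.pyGet? part 0).map fun c =>
        (c, PySem.Chars.splitOn (PySem.List.slice part (some 1) none) ['/'])

-- programs.index(arg): the programs are 1-char strings, so a non-1-char arg is never found (ValueError = none)
def pyIndexStr (s : List Char) (cs : List Char) : Option Nat :=
  match cs with
  | [c] => PySem.List.index? s c
  | _ => none

-- one instruction of the inner 'for instruction in instructions' body
def stepA (ins : Char × List (List Char)) (s : List Char) : Option (List Char) :=
  if ins.1 = 's' then
    (PySem.List.pyGet? ins.2 0).bind fun a0 =>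
    (PySem.Int.ofChars? a0).map fun k =>
      PySem.List.slice s (some (-k)) none ++ PySem.List.slice s none (some (-k))
  else if ins.1 = 'x' then
    (PySem.List.pyGet? ins.2 1).bind fun a1 =>
    (PySem.Int.ofChars? a1).bind fun j =>
    (PySem.List.pyGet? s j).bind fun vj =>
    (PySem.List.pyGet? ins.2 0).bind fun a0 =>
    (PySem.Int.ofChars? a0).bind fun i =>
    (PySem.List.pyGet? s i).bind fun vi =>
    (PySem.List.pySet? s i vj).bind fun s1 =>
    PySem.List.pySet? s1 j vi
  else if ins.1 = 'p' then
    (PySem.List.pyGet? ins.2 0).bind fun a0 =>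
    (pyIndexStr s a0).bind fun ia =>
    (PySem.List.pyGet? ins.2 1).bind fun a1 =>
    (pyIndexStr s a1).bind fun ib =>
    some ((s.set ia (s.getD ib 'a')).set ib (s.getD ia 'a'))
  else some s

def danceA (ins : List (Char × List (List Char))) (s : List Char) : Option (List Char) :=
  ins.foldl (fun o i => o.bind (stepA i)) (some s)

-- the while loop; '"".join(programs) == "abcdefghijklmnop"' ported as list equality; fuel 16!+2
-- (the loop provably exits within 16! dances; stateList is dead but kept faithful)
def loopA (ins : List (Char × List (List Char))) :
    Nat → List Char → Nat → List (List Char) → Option (Nat × List Char)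
  | 0, _, _, _ => none
  | fuel+1, s, cnt, sl =>
    if ¬ s = "abcdefghijklmnop".toList ∨ cnt = 0 then
      (danceA ins s).bind fun s' => loopA ins fuel s' (cnt+1) (sl ++ [s])
    else some (cnt, s)

def part2 (lines : List String) : String :=
  match parseA lines with
  | none => ""   -- Python raises here; Pre_part2 excludes these inputs
  | some ins =>
    match loopA ins 20922789888002
        ((PySem.List.pyRange 97 113 1).map (fun i => Char.ofNat i.toNat)) 0 [] with
    | none => ""
    | some (r, s) =>
      match (List.range (1000000000 % r)).foldl (fun o _ => o.bind (danceA ins)) (some s) with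
      | none => ""
      | some t => "Password is " ++ String.ofList t ++ "."

-- ===== PORT B =====

-- ord(args[k]) - 97 (ord raises unless the arg is a single character)
def charCode (cs : List Char) : Option Int :=
  match cs with
  | [c] => some ((c.toNat : Int) - 97)
  | _ => none

def ident16 : List Int := PySem.List.pyRange 0 16 1

-- comp(p, q) = [p[v] for v in q]; under parse success every entry of q is in [0,16) and
-- len(p) = 16, so Python's p[v] never raises and pyGetD is exact there
def compPerm (p q : List Int) : List Int := q.map fun v => PySem.List.pyGetD p v 0

-- pow_perm's while loop (r = comp(r,p) on odd bit; p = comp(p,p); n >>= 1)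
def powGo (r p : List Int) (n : Nat) : List Int :=
  if n = 0 then r
  else powGo (if n &&& 1 = 1 then compPerm r p else r) (compPerm p p) (n >>> 1)
  termination_by n
  decreasing_by simp [Nat.shiftRight_one]; omega

-- the parsing for-loop of B, one part: updates (pos, ren)
def bstep (pr : List Int × List Int) (part : List Char) : Option (List Int × List Int) :=
  (PySem.List.pyGet? part 0).bind fun op =>
  let args := PySem.Chars.splitOn (PySem.List.slice part (some 1) none) ['/']
  if op = 's' then
    (PySem.List.pyGet? args 0).bind fun a0 =>
    (PySem.Int.ofChars? a0).map fun k =>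
      (PySem.List.slice pr.1 (some (-k)) none ++ PySem.List.slice pr.1 none (some (-k)), pr.2)
  else if op = 'x' then
    (PySem.List.pyGet? args 0).bind fun a0 =>
    (PySem.Int.ofChars? a0).bind fun i =>
    (PySem.List.pyGet? args 1).bind fun a1 =>
    (PySem.Int.ofChars? a1).bind fun j =>
    (PySem.List.pyGet? pr.1 j).bind fun vj =>
    (PySem.List.pyGet? pr.1 i).bind fun vi =>
    (PySem.List.pySet? pr.1 i vj).bind fun p1 =>
    (PySem.List.pySet? p1 j vi).map fun p2 => (p2, pr.2)
  else if op = 'p' then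
    (PySem.List.pyGet? args 0).bind fun a0 =>
    (charCode a0).bind fun a =>
    (PySem.List.pyGet? args 1).bind fun a1 =>
    (charCode a1).bind fun b =>
    some (pr.1, pr.2.map fun v => if v = a then b else if v = b then a else v)
  else some pr

def part2_alt (lines : List String) : String :=
  match (PySem.List.pyGet? lines 0).bind (fun l0 =>
      (PySem.Chars.splitOn l0.toList [',']).foldlM bstep (ident16, ident16)) with
  | none => ""   -- Python raises here; Pre_part2 excludes these inputs
  | some (pos, ren) =>
    "Password is " ++ String.ofList ((List.range 16).map fun (i : Nat) =>
      Char.ofNat (97 + (PySem.List.pyGetD (powGo ident16 ren 1000000000)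
        (PySem.List.pyGetD (powGo ident16 pos 1000000000) (i : Int) 0) 0).toNat)) ++ "."

-- ===== PRECONDITION & SPEC =====

def pvArg (args : List (List Char)) (k : Nat) : List Char := args.getD k []

-- a dance move A executes without raising: 's' with an int arg, 'x' with two int args that are
-- in-range indexes, 'p' with two single-char args among 'a'..'p' (the only programs present);
-- any other first letter is silently ignored by A
def pvValidPart (part : List Char) : Prop :=
  part ≠ [] ∧
  ((part.headD ' ' = 's' →
      (PySem.Int.ofChars? (pvArg (PySem.Chars.splitOn (part.drop 1) ['/']) 0)).isSome = true) ∧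
   (part.headD ' ' = 'x' →
      2 ≤ (PySem.Chars.splitOn (part.drop 1) ['/']).length ∧
      (PySem.Int.ofChars? (pvArg (PySem.Chars.splitOn (part.drop 1) ['/']) 0)).isSome = true ∧
      (PySem.Int.ofChars? (pvArg (PySem.Chars.splitOn (part.drop 1) ['/']) 1)).isSome = true ∧
      -16 ≤ (PySem.Int.ofChars? (pvArg (PySem.Chars.splitOn (part.drop 1) ['/']) 0)).getD 0 ∧
      (PySem.Int.ofChars? (pvArg (PySem.Chars.splitOn (part.drop 1) ['/']) 0)).getD 0 < 16 ∧
      -16 ≤ (PySem.Int.ofChars? (pvArg (PySem.Chars.splitOn (part.drop 1) ['/']) 1)).getD 0 ∧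
      (PySem.Int.ofChars? (pvArg (PySem.Chars.splitOn (part.drop 1) ['/']) 1)).getD 0 < 16) ∧
   (part.headD ' ' = 'p' →
      2 ≤ (PySem.Chars.splitOn (part.drop 1) ['/']).length ∧
      (pvArg (PySem.Chars.splitOn (part.drop 1) ['/']) 0).length = 1 ∧
      97 ≤ ((pvArg (PySem.Chars.splitOn (part.drop 1) ['/']) 0).headD ' ').toNat ∧
      ((pvArg (PySem.Chars.splitOn (part.drop 1) ['/']) 0).headD ' ').toNat ≤ 112 ∧
      (pvArg (PySem.Chars.splitOn (part.drop 1) ['/']) 1).length = 1 ∧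
      97 ≤ ((pvArg (PySem.Chars.splitOn (part.drop 1) ['/']) 1).headD ' ').toNat ∧
      ((pvArg (PySem.Chars.splitOn (part.drop 1) ['/']) 1).headD ' ').toNat ≤ 112))

-- exactly the inputs on which the Python A returns normally (otherwise int()/indexing/.index raise)
def Pre_part2 (lines : List String) : Prop :=
  lines ≠ [] ∧ ∀ part ∈ PySem.Chars.splitOn ((lines.headD "").toList) [','], pvValidPart part

instance (lines : List String) : Decidable (Pre_part2 lines) := by
  unfold Pre_part2 pvValidPart; infer_instance

def pvWitness_part2 : List String := ["s3,x2/13,pg/a,x-1/0,s-5"]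

def Spec_part2 (lines : List String) (out : String) : Prop := out = part2_alt lines
instance (lines : List String) (out : String) : Decidable (Spec_part2 lines out) := by
  unfold Spec_part2; infer_instance

-- ===== CLAIM (what is proved, stated in full; the proofs are below) =====
def Claim_equal_part2 : Prop :=
  ∀ (lines : List String), Dom_part2 lines → Pre_part2 lines → Spec_part2 lines (part2 lines)

-- ===== LEMMAS AND PROOFS =====

def pvBase : List Char :=
  ['a','b','c','d','e','f','g','h','i','j','k','l','m','n','o','p']
def pvChr (x : Int) : Char := Char.ofNat (97 + x.toNat)
def pvIdx (c : Char) : Int := (c.toNat : Int) - 97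
def pvApplyF (f g : Int → Int) (s : List Char) : List Char :=
  (List.range 16).map fun (i : Nat) => pvChr (g (pvIdx (s.getD (f (i : Int)).toNat 'a')))
def pvGood (f : Int → Int) : Prop := ∀ v : Int, 0 ≤ v → v < 16 → 0 ≤ f v ∧ f v < 16
def pvInjOn (f : Int → Int) : Prop :=
  ∀ v w : Int, 0 ≤ v → v < 16 → 0 ≤ w → w < 16 → f v = f w → v = w
def pvInv (s : List Char) : Prop := s.length = 16 ∧ s.Nodup ∧ ∀ c ∈ s, c ∈ pvBase
def pvBounded (P : List Int) : Prop := P.length = 16 ∧ ∀ x ∈ P, 0 ≤ x ∧ x < 16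
def pvValidL (P : List Int) : Prop := pvBounded P ∧ P.Nodup
def pvF (P : List Int) (v : Int) : Int := PySem.List.pyGetD P v 0

-- character arithmetic
theorem pvChr_toNat (x : Int) (h1 : x < 16) : (pvChr x).toNat = 97 + x.toNat := by
  unfold pvChr
  rw [Char.toNat_ofNat]
  have : (97 + x.toNat).isValidChar := Or.inl (by omega)
  simp [this]

theorem pvIdx_chr (x : Int) (h0 : 0 ≤ x) (h1 : x < 16) : pvIdx (pvChr x) = x := by
  unfold pvIdx; rw [pvChr_toNat x h1]; omega

theorem pvChr_inj {x y : Int} (hx0 : 0 ≤ x) (hx : x < 16) (hy0 : 0 ≤ y) (hy : y < 16)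
    (h : pvChr x = pvChr y) : x = y := by
  have := congrArg Char.toNat h
  rw [pvChr_toNat x hx, pvChr_toNat y hy] at this
  omega

theorem pvChr_mem_base {x : Int} (h0 : 0 ≤ x) (h1 : x < 16) : pvChr x ∈ pvBase := by
  interval_cases x <;> decide

theorem chr_pvIdx {c : Char} (h : c ∈ pvBase) : pvChr (pvIdx c) = c := by
  fin_cases h <;> decide

theorem pvIdx_range {c : Char} (h : c ∈ pvBase) : 0 ≤ pvIdx c ∧ pvIdx c < 16 := by
  fin_cases h <;> decide

theorem mem_pvBase_iff (c : Char) : c ∈ pvBase ↔ 97 ≤ c.toNat ∧ c.toNat ≤ 112 := by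
  constructor
  · intro h; fin_cases h <;> decide
  · rintro ⟨h1, h2⟩
    have hc : c = pvChr ((c.toNat : Int) - 97) := by
      unfold pvChr
      have : (97 + ((c.toNat : Int) - 97).toNat) = c.toNat := by omega
      rw [this, Char.ofNat_toNat]
    rw [hc]; exact pvChr_mem_base (by omega) (by omega)

theorem inv_getD_mem {s : List Char} (hs : pvInv s) (j : Nat) : s.getD j 'a' ∈ pvBase := by
  by_cases hj : j < s.length
  · rw [List.getD_eq_getElem s 'a' hj]; exact hs.2.2 _ (List.getElem_mem _)
  · rw [List.getD_eq_default s 'a' (by omega)]; decide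

theorem pvInv_mem_iff {s : List Char} (hs : pvInv s) (c : Char) : c ∈ s ↔ c ∈ pvBase := by
  obtain ⟨hlen, hnd, hsub⟩ := hs
  constructor
  · exact hsub c
  · intro hc
    have hsp : s.Subperm pvBase := List.Nodup.subperm hnd hsub
    have : s.Perm pvBase := hsp.perm_of_length_le (by simp [hlen, pvBase])
    exact (this.mem_iff).2 hc

-- pvF facts
theorem pvF_bounds {P : List Int} (hB : pvBounded P) (v : Int) :
    0 ≤ pvF P v ∧ pvF P v < 16 := by
  unfold pvF PySem.List.pyGetD
  cases h : PySem.List.pyGet? P v with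
  | none => simp
  | some x => simpa using hB.2 x (PySem.List.mem_of_pyGet?_eq_some P h)

theorem pvF_good {P : List Int} (hB : pvBounded P) : pvGood (pvF P) :=
  fun v _ _ => pvF_bounds hB v

theorem pvF_nat {P : List Int} (hlen : P.length = 16) {n : Nat} (hn : n < 16) :
    pvF P (n : Int) = P[n]'(by omega) := by
  simp [pvF, PySem.List.pyGetD]
  rw [List.getElem?_eq_getElem (by omega)]
  rfl

theorem pvF_inj {P : List Int} (hV : pvValidL P) : pvInjOn (pvF P) := by
  intro v w hv0 hv hw0 hw h
  obtain ⟨⟨hlen, _⟩, hnd⟩ := hV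
  have hv' : v = ((v.toNat : Nat) : Int) := by omega
  have hw' : w = ((w.toNat : Nat) : Int) := by omega
  rw [hv', hw'] at h
  rw [pvF_nat hlen (by omega), pvF_nat hlen (by omega)] at h
  have := (List.Nodup.getElem_inj_iff hnd).1 h
  omega

-- pvApplyF facts
theorem length_pvApplyF (f g : Int → Int) (s : List Char) : (pvApplyF f g s).length = 16 := by
  simp [pvApplyF]

theorem getD_pvApplyF (f g : Int → Int) (s : List Char) {n : Nat} (hn : n < 16) (d : Char) :
    (pvApplyF f g s).getD n d = pvChr (g (pvIdx (s.getD (f (n : Int)).toNat 'a'))) := by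
  unfold pvApplyF
  exact PySem.List.getD_map_range _ 16 n d hn

theorem getElem_pvApplyF (f g : Int → Int) (s : List Char) {n : Nat} (hn : n < 16) :
    (pvApplyF f g s)[n]'(by rw [length_pvApplyF]; omega)
      = pvChr (g (pvIdx (s.getD (f (n : Int)).toNat 'a'))) := by
  rw [← List.getD_eq_getElem _ 'a' _, getD_pvApplyF f g s hn]

theorem pvApplyF_comp (f g f' g' : Int → Int) (s : List Char)
    (hf : pvGood f) (hg' : pvGood g') (hs : pvInv s) :
    pvApplyF f g (pvApplyF f' g' s) = pvApplyF (f' ∘ f) (g ∘ g') s := by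
  apply List.ext_getElem (by rw [length_pvApplyF, length_pvApplyF])
  intro n h1 h2
  have hn : n < 16 := by rw [length_pvApplyF] at h1; exact h1
  rw [getElem_pvApplyF _ _ _ hn, getElem_pvApplyF _ _ _ hn]
  have hfb := hf (n : Int) (by omega) (by exact_mod_cast hn)
  have hnat : ((f (n : Int)).toNat : Int) = f (n : Int) := by omega
  rw [getD_pvApplyF f' g' s (show (f (n : Int)).toNat < 16 by omega) 'a']
  have harg := pvIdx_range (inv_getD_mem hs (f' (((f (n : Int)).toNat : Nat) : Int)).toNat)
  have hz := hg' _ harg.1 harg.2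
  rw [pvIdx_chr _ hz.1 hz.2]
  simp only [Function.comp_apply]
  rw [hnat]

theorem pvGood_iterate {f : Int → Int} (hf : pvGood f) (n : Nat) : pvGood f^[n] := by
  induction n with
  | zero => intro v h0 h1; simpa using ⟨h0, h1⟩
  | succ n ih =>
    intro v h0 h1
    rw [Function.iterate_succ_apply]
    have := hf v h0 h1
    exact ih _ this.1 this.2

theorem pvInjOn_iterate {f : Int → Int} (hf : pvGood f) (hi : pvInjOn f) (n : Nat) :
    pvInjOn f^[n] := by
  induction n with
  | zero => intro v w h0 h1 h2 h3 h; simpa using h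
  | succ n ih =>
    intro v w h0 h1 h2 h3 h
    rw [Function.iterate_succ_apply, Function.iterate_succ_apply] at h
    have hv := hf v h0 h1
    have hw := hf w h2 h3
    exact hi v w h0 h1 h2 h3 (ih _ _ hv.1 hv.2 hw.1 hw.2 h)

theorem pvInv_applyF {f g : Int → Int} {s : List Char}
    (hf : pvGood f) (hfi : pvInjOn f) (hg : pvGood g) (hgi : pvInjOn g) (hs : pvInv s) :
    pvInv (pvApplyF f g s) := by
  refine ⟨length_pvApplyF f g s, ?_, ?_⟩
  · apply List.Nodup.map_on _ List.nodup_range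
    intro i hi j hj h
    have hi16 : i < 16 := List.mem_range.1 hi
    have hj16 : j < 16 := List.mem_range.1 hj
    have hfi' := hf (i : Int) (by omega) (by exact_mod_cast hi16)
    have hfj' := hf (j : Int) (by omega) (by exact_mod_cast hj16)
    have hai := pvIdx_range (inv_getD_mem hs (f (i : Int)).toNat)
    have haj := pvIdx_range (inv_getD_mem hs (f (j : Int)).toNat)
    have hgi' := hg _ hai.1 hai.2
    have hgj' := hg _ haj.1 haj.2
    have h1 := pvChr_inj hgi'.1 hgi'.2 hgj'.1 hgj'.2 h
    have h2 := hgi _ _ hai.1 hai.2 haj.1 haj.2 h1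
    -- the two s-entries agree
    have hilen : (f (i : Int)).toNat < s.length := by rw [hs.1]; omega
    have hjlen : (f (j : Int)).toNat < s.length := by rw [hs.1]; omega
    rw [List.getD_eq_getElem s 'a' hilen, List.getD_eq_getElem s 'a' hjlen] at h2
    have hceq : s[(f (i : Int)).toNat] = s[(f (j : Int)).toNat] := by
      have e1 := chr_pvIdx (hs.2.2 _ (List.getElem_mem hilen))
      have e2 := chr_pvIdx (hs.2.2 _ (List.getElem_mem hjlen))
      rw [← e1, ← e2, h2]
    have := (List.Nodup.getElem_inj_iff hs.2.1).1 hceq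
    have := hfi (i : Int) (j : Int) (by omega) (by exact_mod_cast hi16)
      (by omega) (by exact_mod_cast hj16) (by omega)
    omega
  · intro c hc
    simp only [pvApplyF, List.mem_map, List.mem_range] at hc
    obtain ⟨i, hi, rfl⟩ := hc
    have hai := pvIdx_range (inv_getD_mem hs (f (i : Int)).toNat)
    have := hg _ hai.1 hai.2
    exact pvChr_mem_base this.1 this.2

-- getD of map, in range
theorem getD_map_of_lt {α β : Type} (F : α → β) (l : List α) {n : Nat} (h : n < l.length)
    (d : β) (d' : α) : (l.map F).getD n d = F (l.getD n d') := by
  rw [List.getD_eq_getElem _ d (by simpa using h), List.getD_eq_getElem _ d' h,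
    List.getElem_map]

-- pvApplyF as a map over the position list
theorem pvApplyF_eq_map {pos : List Int} (hlen : pos.length = 16) (g : Int → Int)
    (s : List Char) :
    pvApplyF (pvF pos) g s = pos.map (fun j => pvChr (g (pvIdx (s.getD j.toNat 'a')))) := by
  apply List.ext_getElem (by rw [length_pvApplyF]; simp [hlen])
  intro n h1 h2
  have hn : n < 16 := by rw [length_pvApplyF] at h1; exact h1
  rw [getElem_pvApplyF _ _ _ hn, List.getElem_map, pvF_nat hlen hn]

-- slice bookkeeping
theorem slice_none_some {α : Type} (xs : List α) (b : Int) :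
    PySem.List.slice xs none (some b) = xs.take (PySem.List.clampIdx xs.length b) := by
  unfold PySem.List.slice
  rfl

theorem slice_from_map {α β : Type} (F : α → β) (xs : List α) (a : Int) :
    PySem.List.slice (xs.map F) (some a) none = (PySem.List.slice xs (some a) none).map F := by
  rw [PySem.List.slice_some_none, PySem.List.slice_some_none, List.length_map, List.map_drop]

theorem slice_to_map {α β : Type} (F : α → β) (xs : List α) (b : Int) :
    PySem.List.slice (xs.map F) none (some b) = (PySem.List.slice xs none (some b)).map F := by
  rw [slice_none_some, slice_none_some, List.length_map, List.map_take]

theorem rot_perm {α : Type} (xs : List α) (k : Int) :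
    (PySem.List.slice xs (some k) none ++ PySem.List.slice xs none (some k)).Perm xs := by
  rw [PySem.List.slice_some_none, slice_none_some]
  exact List.perm_append_comm.trans
    (by rw [List.take_append_drop])

-- double-set swap
theorem swap_getElem {α : Type} (t : List α) (d : α) {i j n : Nat}
    (hi : i < t.length) (hj : j < t.length) (hn : n < t.length) :
    ((t.set i (t.getD j d)).set j (t.getD i d))[n]'(by simpa using hn)
      = if n = j then t[i] else if n = i then t[j] else t[n] := by
  simp only [List.getElem_set, List.getD_eq_getElem t d hj, List.getD_eq_getElem t d hi]
  split_ifs <;> first | rfl | omega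

theorem swap_perm {α : Type} (t : List α) (d : α) {i j : Nat}
    (hi : i < t.length) (hj : j < t.length) :
    ((t.set i (t.getD j d)).set j (t.getD i d)).Perm t := by
  have hmap : (t.set i (t.getD j d)).set j (t.getD i d)
      = ((List.finRange t.length).map (Equiv.swap (⟨i, hi⟩ : Fin t.length) ⟨j, hj⟩)).map
          t.get := by
    apply List.ext_getElem (by simp)
    intro m h1 h2
    have hm : m < t.length := by simpa using h1
    rw [swap_getElem t d hi hj hm, List.getElem_map, List.getElem_map, List.getElem_finRange]
    simp only [Fin.cast_mk, List.get_eq_getElem, Equiv.swap_apply_def, Fin.mk.injEq]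
    split_ifs <;> subst_vars <;> rfl
  rw [hmap]
  exact ((Equiv.Perm.map_finRange_perm _).map t.get).trans
    (by rw [List.map_get_finRange])

-- python indexing on length-16 lists
def pvNIdx (i : Int) : Nat := (if i < 0 then i + 16 else i).toNat

theorem pvNIdx_lt {i : Int} (h0 : -16 ≤ i) (h1 : i < 16) : pvNIdx i < 16 := by
  unfold pvNIdx; split_ifs <;> omega

theorem pyIdx?_16 {i : Int} (h0 : -16 ≤ i) (h1 : i < 16) :
    PySem.List.pyIdx? 16 i = some (pvNIdx i) := by
  rcases Int.lt_or_le i 0 with h | h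
  · have e1 : pvNIdx i = (i + 16).toNat := by unfold pvNIdx; rw [if_pos h]
    unfold PySem.List.pyIdx?
    rw [if_neg (by omega), if_pos (by push_cast; omega), e1]
    congr 1
    omega
  · have e1 : pvNIdx i = i.toNat := by unfold pvNIdx; rw [if_neg (by omega)]
    unfold PySem.List.pyIdx?
    rw [if_pos h, if_pos (by push_cast; omega), e1]

theorem pyGet?_16 {α : Type} {t : List α} (hlen : t.length = 16) {i : Int}
    (h0 : -16 ≤ i) (h1 : i < 16) (d : α) :
    PySem.List.pyGet? t i = some (t.getD (pvNIdx i) d) := by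
  unfold PySem.List.pyGet?
  rw [hlen, pyIdx?_16 h0 h1]
  have hlt : pvNIdx i < t.length := by rw [hlen]; exact pvNIdx_lt h0 h1
  rw [List.getD_eq_getElem t d hlt]
  simp [List.getElem?_eq_getElem hlt]

theorem pySet?_16 {α : Type} {t : List α} (hlen : t.length = 16) {i : Int}
    (h0 : -16 ≤ i) (h1 : i < 16) (v : α) :
    PySem.List.pySet? t i v = some (t.set (pvNIdx i) v) := by
  unfold PySem.List.pySet?
  rw [hlen, pyIdx?_16 h0 h1]
  rfl

-- parsing bookkeeping
def pvArgsOf (part : List Char) : List (List Char) :=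
  PySem.Chars.splitOn (part.drop 1) ['/']
def pvInstrOf (part : List Char) : Char × List (List Char) := (part.headD ' ', pvArgsOf part)

theorem slice_one_eq_drop {α : Type} (part : List α) :
    PySem.List.slice part (some 1) none = part.drop 1 := by
  rw [PySem.List.slice_from part (by omega)]
  rfl

theorem pyGet?_zero_of_ne_nil {α : Type} {l : List α} (h : l ≠ []) (d : α) :
    PySem.List.pyGet? l 0 = some (l.headD d) := by
  cases l with
  | nil => exact absurd rfl h
  | cons a t => rw [PySem.List.pyGet?_zero_cons]; rfl

theorem getD_zero_eq_headD {α : Type} (l : List α) (d : α) : l.getD 0 d = l.headD d := by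
  cases l <;> rfl

theorem pyGet?_zero_getD {α : Type} {l : List α} (h : l ≠ []) (d : α) :
    PySem.List.pyGet? l 0 = some (l.getD 0 d) := by
  rw [pyGet?_zero_of_ne_nil h d, getD_zero_eq_headD]

theorem pyGet?_one_of_len {α : Type} {l : List α} (h : 2 ≤ l.length) (d : α) :
    PySem.List.pyGet? l 1 = some (l.getD 1 d) := by
  match l, h with
  | a :: b :: t, _ => simp [PySem.List.pyGet?, PySem.List.pyIdx?]

theorem mapM_option_eq_map {α β : Type} (f : α → Option β) (g : α → β) (l : List α)
    (h : ∀ x ∈ l, f x = some (g x)) : l.mapM f = some (l.map g) := by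
  induction l with
  | nil => rfl
  | cons a t ih =>
    rw [List.mapM_cons, h a (by simp), ih (fun x hx => h x (by simp [hx]))]
    rfl

theorem parseA_eq {lines : List String} (h : lines ≠ [])
    (hps : ∀ part ∈ PySem.Chars.splitOn ((lines.headD "").toList) [','], part ≠ []) :
    parseA lines
      = some ((PySem.Chars.splitOn ((lines.headD "").toList) [',']).map pvInstrOf) := by
  unfold parseA
  rw [pyGet?_zero_of_ne_nil h ""]
  show ((PySem.Chars.splitOn ((lines.headD "").toList) [',']).mapM _) = _
  exact mapM_option_eq_map _ _ _ (fun part hp => by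
    rw [pyGet?_zero_of_ne_nil (hps part hp) ' ', slice_one_eq_drop]
    rfl)

-- swaps of values
def pvSwC (a b c : Char) : Char := if c = a then b else if c = b then a else c
def pvSwI (a b v : Int) : Int := if v = a then b else if v = b then a else v

theorem pvSwI_invol (a b : Int) : Function.Involutive (pvSwI a b) := by
  intro v; unfold pvSwI; split_ifs <;> omega

theorem pvF_map {R : List Int} (hlen : R.length = 16) (f : Int → Int) {z : Int}
    (h0 : 0 ≤ z) (h1 : z < 16) : pvF (R.map f) z = f (pvF R z) := by
  have hz : z = ((z.toNat : Nat) : Int) := by omega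
  rw [hz, pvF_nat (by simp [hlen]) (by omega), pvF_nat hlen (by omega), List.getElem_map]

theorem swc_chr {R : List Int} (hR : pvBounded R) {a b : Char} (ha : a ∈ pvBase)
    (hb : b ∈ pvBase) {z : Int} (h0 : 0 ≤ z) (h1 : z < 16) :
    pvSwC a b (pvChr (pvF R z)) = pvChr (pvF (R.map (pvSwI (pvIdx a) (pvIdx b))) z) := by
  rw [pvF_map hR.1 _ h0 h1]
  have hwB := pvF_bounds hR z
  have hA := pvIdx_range ha
  have hB := pvIdx_range hb
  unfold pvSwC pvSwI
  by_cases e1 : pvF R z = pvIdx a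
  · rw [if_pos e1, if_pos (by rw [e1, chr_pvIdx ha]), chr_pvIdx hb]
  · rw [if_neg e1, if_neg (fun hc => e1 (by
      rw [← chr_pvIdx ha] at hc
      exact pvChr_inj hwB.1 hwB.2 hA.1 hA.2 hc))]
    by_cases e2 : pvF R z = pvIdx b
    · rw [if_pos e2, if_pos (by rw [e2, chr_pvIdx hb]), chr_pvIdx ha]
    · rw [if_neg e2, if_neg (fun hc => e2 (by
        rw [← chr_pvIdx hb] at hc
        exact pvChr_inj hwB.1 hwB.2 hB.1 hB.2 hc))]

theorem index_swap_eq_map {t : List Char} (hnd : t.Nodup) {a b : Char} {ia ib : Nat}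
    (hia : PySem.List.index? t a = some ia) (hib : PySem.List.index? t b = some ib) :
    (t.set ia (t.getD ib 'a')).set ib (t.getD ia 'a') = t.map (pvSwC a b) := by
  obtain ⟨hlta, hta, -⟩ := PySem.List.getElem_of_index?_eq_some hia
  obtain ⟨hltb, htb, -⟩ := PySem.List.getElem_of_index?_eq_some hib
  apply List.ext_getElem (by simp)
  intro n h1 h2
  have hn : n < t.length := by simpa using h1
  rw [swap_getElem t 'a' hlta hltb hn, List.getElem_map]
  unfold pvSwC
  by_cases e1 : n = ib
  · subst e1
    rw [if_pos rfl, hta, htb]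
    by_cases hab : b = a
    · rw [if_pos hab, hab]
    · rw [if_neg hab, if_pos rfl]
  · rw [if_neg e1]
    by_cases e2 : n = ia
    · subst e2
      rw [if_pos rfl, hta, htb, if_pos rfl]
    · rw [if_neg e2]
      have hna : t[n] ≠ a := fun hc =>
        e2 ((List.Nodup.getElem_inj_iff hnd).1 (by rw [hc, hta]))
      have hnb : t[n] ≠ b := fun hc =>
        e1 ((List.Nodup.getElem_inj_iff hnd).1 (by rw [hc, htb]))
      rw [if_neg hna, if_neg hnb]

theorem valid_of_perm {P Q : List Int} (h : P.Perm Q) (hQ : pvValidL Q) : pvValidL P :=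
  ⟨⟨h.length_eq.trans hQ.1.1, fun x hx => hQ.1.2 x (h.subset hx)⟩, (h.nodup_iff).2 hQ.2⟩

theorem valid_map_swi {R : List Int} (hR : pvValidL R) {ia ib : Int}
    (ha0 : 0 ≤ ia) (ha1 : ia < 16) (hb0 : 0 ≤ ib) (hb1 : ib < 16) :
    pvValidL (R.map (pvSwI ia ib)) := by
  refine ⟨⟨by simp [hR.1.1], ?_⟩, List.Nodup.map (pvSwI_invol ia ib).injective hR.2⟩
  intro x hx
  simp only [List.mem_map] at hx
  obtain ⟨v, hv, rfl⟩ := hx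
  have := hR.1.2 v hv
  unfold pvSwI
  split_ifs <;> omega
theorem ofChars?_nil : PySem.Int.ofChars? [] = none := by decide

theorem danceA_cons {i : Char × List (List Char)} {ins : List (Char × List (List Char))}
    {s s' : List Char} (h : stepA i s = some s') :
    danceA (i :: ins) s = danceA ins s' := by
  unfold danceA
  rw [List.foldl_cons]
  simp [h]

theorem step_decomp (part : List Char) (hv : pvValidPart part) (pos ren : List Int)
    (hp : pvValidL pos) (hr : pvValidL ren) :
    ∃ pos' ren',
      bstep (pos, ren) part = some (pos', ren') ∧ pvValidL pos' ∧ pvValidL ren' ∧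
      ∀ s : List Char, pvInv s →
        stepA (pvInstrOf part) (pvApplyF (pvF pos) (pvF ren) s)
          = some (pvApplyF (pvF pos') (pvF ren') s) := by
  obtain ⟨hne, hS, hX, hP⟩ := hv
  simp only [pvArg] at hS hX hP
  by_cases hs : part.headD ' ' = 's'
  · -- spin
    obtain ⟨k, hk⟩ := Option.isSome_iff_exists.1 (hS hs)
    have hargs : PySem.Chars.splitOn (part.drop 1) ['/'] ≠ [] := by
      intro h0
      rw [h0] at hk
      rw [show ([] : List (List Char)).getD 0 [] = [] from rfl, ofChars?_nil] at hk
      cases hk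
    have hperm : (PySem.List.slice pos (some (-k)) none
        ++ PySem.List.slice pos none (some (-k))).Perm pos := rot_perm pos (-k)
    refine ⟨_, ren, ?_, valid_of_perm hperm hp, hr, ?_⟩
    · simp only [bstep, pyGet?_zero_of_ne_nil hne ' ', slice_one_eq_drop,
        pyGet?_zero_getD hargs [], hs, hk, Option.bind_some, Option.map_some, Char.reduceEq, reduceIte]
    · intro s hsInv
      simp only [stepA, pvInstrOf, pvArgsOf, hs, pyGet?_zero_getD hargs [], hk,
        Option.bind_some, Option.map_some, Char.reduceEq, reduceIte]
      congr 1
      rw [pvApplyF_eq_map hp.1.1, slice_from_map, slice_to_map, ← List.map_append,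
        pvApplyF_eq_map (hperm.length_eq.trans hp.1.1)]
  · by_cases hx : part.headD ' ' = 'x'
    · -- exchange
      obtain ⟨h2len, hi0s, hi1s, hb⟩ := hX hx
      obtain ⟨i, hi⟩ := Option.isSome_iff_exists.1 hi0s
      obtain ⟨j, hj⟩ := Option.isSome_iff_exists.1 hi1s
      rw [hi, hj] at hb
      simp only [Option.getD_some] at hb
      have hbi : -16 ≤ i ∧ i < 16 := ⟨hb.1, hb.2.1⟩
      have hbj : -16 ≤ j ∧ j < 16 := ⟨hb.2.2.1, hb.2.2.2⟩
      have hargs : PySem.Chars.splitOn (part.drop 1) ['/'] ≠ [] := by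
        intro h0
        rw [h0] at h2len
        simp at h2len
      have hnil : pvNIdx i < 16 := pvNIdx_lt hbi.1 hbi.2
      have hnjl : pvNIdx j < 16 := pvNIdx_lt hbj.1 hbj.2
      have hplen := hp.1.1
      have hperm : ((pos.set (pvNIdx i) (pos.getD (pvNIdx j) 0)).set (pvNIdx j)
          (pos.getD (pvNIdx i) 0)).Perm pos :=
        swap_perm pos 0 (by omega) (by omega)
      refine ⟨_, ren, ?_, valid_of_perm hperm hp, hr, ?_⟩
      · simp only [bstep, pyGet?_zero_of_ne_nil hne ' ', slice_one_eq_drop,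
          pyGet?_zero_getD hargs [], pyGet?_one_of_len h2len [], hs, hx, hi, hj,
          pyGet?_16 hplen hbj.1 hbj.2 0, pyGet?_16 hplen hbi.1 hbi.2 0,
          pySet?_16 hplen hbi.1 hbi.2 (pos.getD (pvNIdx j) 0),
          pySet?_16 (show (pos.set (pvNIdx i) (pos.getD (pvNIdx j) 0)).length = 16 by
            simp [hplen]) hbj.1 hbj.2 (pos.getD (pvNIdx i) 0),
          Option.bind_some, Option.map_some, Char.reduceEq, reduceIte]
      · intro s hsInv
        have htlen : (pvApplyF (pvF pos) (pvF ren) s).length = 16 := length_pvApplyF _ _ _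
        simp only [stepA, pvInstrOf, pvArgsOf, hs, hx, pyGet?_zero_getD hargs [],
          pyGet?_one_of_len h2len [], hi, hj,
          pyGet?_16 htlen hbj.1 hbj.2 'a', pyGet?_16 htlen hbi.1 hbi.2 'a',
          pySet?_16 htlen hbi.1 hbi.2
            ((pvApplyF (pvF pos) (pvF ren) s).getD (pvNIdx j) 'a'),
          pySet?_16 (show ((pvApplyF (pvF pos) (pvF ren) s).set (pvNIdx i)
              ((pvApplyF (pvF pos) (pvF ren) s).getD (pvNIdx j) 'a')).length = 16 by
            simp [htlen]) hbj.1 hbj.2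
            ((pvApplyF (pvF pos) (pvF ren) s).getD (pvNIdx i) 'a'),
          Option.bind_some, Option.map_some, Char.reduceEq, reduceIte]
        congr 1
        rw [pvApplyF_eq_map hp.1.1]
        rw [getD_map_of_lt _ pos (by omega) 'a' 0, getD_map_of_lt _ pos (by omega) 'a' 0,
          ← List.map_set, ← List.map_set]
        rw [pvApplyF_eq_map (hperm.length_eq.trans hp.1.1)]
    · by_cases hpp : part.headD ' ' = 'p'
      · -- partner
        obtain ⟨h2len, hl0, ha0, ha0', hl1, ha1, ha1'⟩ := hP hpp
        have hargs : PySem.Chars.splitOn (part.drop 1) ['/'] ≠ [] := by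
          intro h0
          rw [h0] at h2len
          simp at h2len
        obtain ⟨c0, hc0⟩ :
            ∃ c, (PySem.Chars.splitOn (part.drop 1) ['/']).getD 0 [] = [c] := by
          rcases hl : (PySem.Chars.splitOn (part.drop 1) ['/']).getD 0 []
            with _ | ⟨c, _ | ⟨d, t⟩⟩
          · rw [hl] at hl0; simp at hl0
          · exact ⟨_, rfl⟩
          · rw [hl] at hl0; simp at hl0
        obtain ⟨c1, hc1⟩ :
            ∃ c, (PySem.Chars.splitOn (part.drop 1) ['/']).getD 1 [] = [c] := by
          rcases hl : (PySem.Chars.splitOn (part.drop 1) ['/']).getD 1 []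
            with _ | ⟨c, _ | ⟨d, t⟩⟩
          · rw [hl] at hl1; simp at hl1
          · exact ⟨_, rfl⟩
          · rw [hl] at hl1; simp at hl1
        have hc0m : c0 ∈ pvBase := by
          rw [mem_pvBase_iff]
          rw [hc0] at ha0 ha0'
          exact ⟨by simpa using ha0, by simpa using ha0'⟩
        have hc1m : c1 ∈ pvBase := by
          rw [mem_pvBase_iff]
          rw [hc1] at ha1 ha1'
          exact ⟨by simpa using ha1, by simpa using ha1'⟩
        have hA := pvIdx_range hc0m
        have hB := pvIdx_range hc1m
        refine ⟨pos, ren.map (pvSwI (pvIdx c0) (pvIdx c1)), ?_,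
          hp, valid_map_swi hr hA.1 hA.2 hB.1 hB.2, ?_⟩
        · simp only [bstep, pyGet?_zero_of_ne_nil hne ' ', slice_one_eq_drop,
            pyGet?_zero_getD hargs [], pyGet?_one_of_len h2len [], hs, hx, hpp,
            hc0, hc1, charCode, Option.bind_some, Char.reduceEq, reduceIte]
          rfl
        · intro s hsInv
          have hInvT : pvInv (pvApplyF (pvF pos) (pvF ren) s) :=
            pvInv_applyF (pvF_good hp.1) (pvF_inj hp) (pvF_good hr.1) (pvF_inj hr) hsInv
          obtain ⟨ia, hia⟩ := Option.isSome_iff_exists.1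
            ((PySem.List.index?_isSome_iff _ _).2 ((pvInv_mem_iff hInvT c0).2 hc0m))
          obtain ⟨ib, hib⟩ := Option.isSome_iff_exists.1
            ((PySem.List.index?_isSome_iff _ _).2 ((pvInv_mem_iff hInvT c1).2 hc1m))
          simp only [stepA, pvInstrOf, pvArgsOf, hs, hx, hpp, pyGet?_zero_getD hargs [],
            pyGet?_one_of_len h2len [], hc0, hc1, pyIndexStr, hia, hib,
            Option.bind_some, Char.reduceEq, reduceIte]
          congr 1
          rw [index_swap_eq_map hInvT.2.1 hia hib]
          rw [pvApplyF_eq_map hp.1.1, pvApplyF_eq_map hp.1.1, List.map_map]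
          apply List.map_congr_left
          intro j hj
          have hz := pvIdx_range (inv_getD_mem hsInv j.toNat)
          exact swc_chr hr.1 hc0m hc1m hz.1 hz.2
      · -- unknown move: no-op
        refine ⟨pos, ren, ?_, hp, hr, ?_⟩
        · simp only [bstep, pyGet?_zero_of_ne_nil hne ' ', hs, hx, hpp,
            Option.bind_some, Char.reduceEq, reduceIte]
        · intro s hsInv
          simp only [stepA, pvInstrOf, pvArgsOf, hs, hx, hpp, Option.bind_some, reduceIte]

theorem fold_decomp (parts : List (List Char)) (hv : ∀ p ∈ parts, pvValidPart p) :
    ∀ pos ren, pvValidL pos → pvValidL ren →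
    ∃ P R, parts.foldlM bstep (pos, ren) = some (P, R) ∧ pvValidL P ∧ pvValidL R ∧
      ∀ s, pvInv s → danceA (parts.map pvInstrOf) (pvApplyF (pvF pos) (pvF ren) s)
        = some (pvApplyF (pvF P) (pvF R) s) := by
  induction parts with
  | nil => exact fun pos ren hp hr => ⟨pos, ren, rfl, hp, hr, fun s _ => rfl⟩
  | cons part rest ih =>
    intro pos ren hp hr
    obtain ⟨pos', ren', hb, hp', hr', hstep⟩ :=
      step_decomp part (hv part (by simp)) pos ren hp hr
    obtain ⟨P, R, hfold, hP, hR, hdance⟩ :=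
      ih (fun p hmem => hv p (by simp [hmem])) pos' ren' hp' hr'
    refine ⟨P, R, ?_, hP, hR, ?_⟩
    · rw [List.foldlM_cons, hb]
      exact hfold
    · intro s hs
      rw [List.map_cons, danceA_cons (hstep s hs), hdance s hs]

set_option maxRecDepth 8192 in
theorem valid_ident : pvValidL ident16 := by
  unfold pvValidL pvBounded ident16
  refine ⟨⟨by decide, by decide⟩, by decide⟩

set_option maxRecDepth 8192 in
theorem pvF_ident_nat : ∀ n : Nat, n < 16 → pvF ident16 (n : Int) = (n : Int) := by decide

theorem pvF_ident {v : Int} (h0 : 0 ≤ v) (h1 : v < 16) : pvF ident16 v = v := by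
  have hv : v = ((v.toNat : Nat) : Int) := by omega
  rw [hv, pvF_ident_nat v.toNat (by omega)]

theorem applyF_id_on {f g : Int → Int} (hf : ∀ n : Nat, n < 16 → f (n : Int) = (n : Int))
    (hg : ∀ v : Int, 0 ≤ v → v < 16 → g v = v) {s : List Char} (hs : pvInv s) :
    pvApplyF f g s = s := by
  apply List.ext_getElem (by rw [length_pvApplyF, hs.1])
  intro n h1 h2
  have hn : n < 16 := by rw [length_pvApplyF] at h1; exact h1
  rw [getElem_pvApplyF _ _ _ hn, hf n hn]
  have hm : s.getD ((n : Int)).toNat 'a' ∈ pvBase := inv_getD_mem hs _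
  have hz := pvIdx_range hm
  rw [hg _ hz.1 hz.2, chr_pvIdx hm]
  have : ((n : Int)).toNat = n := by omega
  rw [this, List.getD_eq_getElem s 'a' (by rw [hs.1]; omega)]

def pvT (P R : List Int) (n : Nat) : List Char :=
  pvApplyF ((pvF P)^[n]) ((pvF R)^[n]) pvBase

theorem pvInv_base : pvInv pvBase := by
  unfold pvInv
  exact ⟨by decide, by decide, fun c hc => hc⟩

theorem pvT_zero (P R : List Int) : pvT P R 0 = pvBase := by
  unfold pvT
  simp only [Function.iterate_zero]
  exact applyF_id_on (fun n _ => rfl) (fun v _ _ => rfl) pvInv_base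

theorem pvInv_T {P R : List Int} (hP : pvValidL P) (hR : pvValidL R) (n : Nat) :
    pvInv (pvT P R n) :=
  pvInv_applyF (pvGood_iterate (pvF_good hP.1) n)
    (pvInjOn_iterate (pvF_good hP.1) (pvF_inj hP) n)
    (pvGood_iterate (pvF_good hR.1) n)
    (pvInjOn_iterate (pvF_good hR.1) (pvF_inj hR) n) pvInv_base

theorem pvT_succ {P R : List Int} (hP : pvValidL P) (hR : pvValidL R)
    {ins : List (Char × List (List Char))}
    (hdance : ∀ t, pvInv t → danceA ins t = some (pvApplyF (pvF P) (pvF R) t)) (n : Nat) :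
    danceA ins (pvT P R n) = some (pvT P R (n + 1)) := by
  rw [hdance _ (pvInv_T hP hR n)]
  congr 1
  unfold pvT
  rw [pvApplyF_comp _ _ _ _ _ (pvF_good hP.1) (pvGood_iterate (pvF_good hR.1) n) pvInv_base,
    ← Function.iterate_succ, ← Function.iterate_succ']

theorem danceN_T {P R : List Int} (hP : pvValidL P) (hR : pvValidL R)
    {ins : List (Char × List (List Char))}
    (hdance : ∀ t, pvInv t → danceA ins t = some (pvApplyF (pvF P) (pvF R) t))
    (c m : Nat) :
    (List.range m).foldl (fun o _ => o.bind (danceA ins)) (some (pvT P R c))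
      = some (pvT P R (c + m)) := by
  induction m with
  | zero => rfl
  | succ m ih =>
    rw [List.range_succ, List.foldl_append, ih, List.foldl_cons, List.foldl_nil,
      Option.bind_some, pvT_succ hP hR hdance (c + m)]
    rfl

theorem pvT_add_period {P R : List Int} (hP : pvValidL P) (hR : pvValidL R) {r : Nat}
    (hTr : pvT P R r = pvBase) (m : Nat) : pvT P R (m + r) = pvT P R m := by
  have h1 : pvT P R (m + r)
      = pvApplyF ((pvF P)^[r] ∘ (pvF P)^[m]) ((pvF R)^[m] ∘ (pvF R)^[r]) pvBase := by
    unfold pvT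
    rw [show m + r = r + m from Nat.add_comm m r, Function.iterate_add (pvF P) r m]
    rw [show (pvF R)^[r + m] = (pvF R)^[m + r] from by rw [Nat.add_comm],
      Function.iterate_add (pvF R) m r]
  rw [h1, ← pvApplyF_comp ((pvF P)^[m]) ((pvF R)^[m]) ((pvF P)^[r]) ((pvF R)^[r]) pvBase
    (pvGood_iterate (pvF_good hP.1) m) (pvGood_iterate (pvF_good hR.1) r) pvInv_base]
  rw [show pvApplyF ((pvF P)^[r]) ((pvF R)^[r]) pvBase = pvT P R r from rfl, hTr]
  rfl

theorem pvT_mod {P R : List Int} (hP : pvValidL P) (hR : pvValidL R) {r : Nat}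
    (hTr : pvT P R r = pvBase) (N : Nat) : pvT P R N = pvT P R (N % r) := by
  have hmul : ∀ q m, pvT P R (m + q * r) = pvT P R m := by
    intro q
    induction q with
    | zero => simp
    | succ q ih =>
      intro m
      rw [show m + (q + 1) * r = (m + q * r) + r from by ring,
        pvT_add_period hP hR hTr, ih]
  conv_lhs => rw [show N = N % r + (N / r) * r from by
    rw [Nat.mul_comm, Nat.mod_add_div]]
  exact hmul _ _

theorem iterate_card {P : List Int} (hV : pvValidL P) {v : Int} (h0 : 0 ≤ v) (h1 : v < 16) :
    (pvF P)^[20922789888000] v = v := by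
  have hgood := pvF_good hV.1
  have hmem : ∀ i : Fin 16, 0 ≤ (i.val : Int) ∧ ((i.val : Int)) < 16 := by
    intro i
    constructor
    · positivity
    · exact_mod_cast i.isLt
  let f : Fin 16 → Fin 16 := fun i =>
    ⟨(pvF P (i.val : Int)).toNat, by
      have := hgood _ (hmem i).1 (hmem i).2
      omega⟩
  have hfv : ∀ i : Fin 16, ((f i).val : Int) = pvF P (i.val : Int) := by
    intro i
    have := hgood _ (hmem i).1 (hmem i).2
    simp only [f]
    omega
  have hinj : Function.Injective f := by
    intro a b hab
    have : pvF P (a.val : Int) = pvF P (b.val : Int) := by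
      rw [← hfv a, ← hfv b, hab]
    have := pvF_inj hV _ _ (hmem a).1 (hmem a).2 (hmem b).1 (hmem b).2 this
    exact Fin.ext (by exact_mod_cast this)
  let e : Equiv.Perm (Fin 16) := Equiv.ofBijective f (Finite.injective_iff_bijective.1 hinj)
  have key : ∀ (n : Nat) (i : Fin 16),
      (pvF P)^[n] (i.val : Int) = (((e ^ n) i).val : Int) := by
    intro n
    induction n with
    | zero => intro i; simp
    | succ n ihn =>
      intro i
      rw [Function.iterate_succ_apply]
      have he : pvF P (i.val : Int) = ((e i).val : Int) := by
        rw [show e i = f i from rfl, hfv i]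
      rw [he, ihn (e i)]
      rw [pow_succ]
      rfl
  have hcard : (20922789888000 : Nat) = Fintype.card (Equiv.Perm (Fin 16)) := by
    rw [Fintype.card_perm, Fintype.card_fin]
    norm_num [Nat.factorial]
  have hone : e ^ (20922789888000 : Nat) = 1 := by
    rw [hcard]
    exact pow_card_eq_one
  have hv : v = (((⟨v.toNat, by omega⟩ : Fin 16)).val : Int) := by simp; omega
  rw [hv, key, hone]
  rfl

theorem exists_period {P R : List Int} (hP : pvValidL P) (hR : pvValidL R) :
    pvT P R 20922789888000 = pvBase := by
  unfold pvT
  refine applyF_id_on ?_ ?_ pvInv_base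
  · intro n hn
    exact iterate_card hP (by positivity) (by exact_mod_cast hn)
  · intro v h0 h1
    exact iterate_card hR h0 h1

set_option maxRecDepth 8192 in
theorem pvBase_lit : pvBase = "abcdefghijklmnop".toList := by decide

theorem loop_ret {P R : List Int} (hP : pvValidL P) (hR : pvValidL R)
    {ins : List (Char × List (List Char))}
    (hdance : ∀ t, pvInv t → danceA ins t = some (pvApplyF (pvF P) (pvF R) t))
    (hex : ∃ m, 0 < m ∧ pvT P R m = pvBase) :
    ∀ (fuel cnt : Nat) (sl : List (List Char)), 0 < cnt → cnt ≤ Nat.find hex →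
      Nat.find hex < cnt + fuel →
      loopA ins fuel (pvT P R cnt) cnt sl = some (Nat.find hex, pvT P R (Nat.find hex)) := by
  intro fuel
  induction fuel with
  | zero => intro cnt sl h1 h2 h3; omega
  | succ fuel ih =>
    intro cnt sl h1 h2 h3
    by_cases he : cnt = Nat.find hex
    · rw [loopA, if_neg (fun hOr => by
        rcases hOr with h | h
        · exact h (by rw [he, (Nat.find_spec hex).2, pvBase_lit])
        · omega)]
      rw [he]
    · have hlt : cnt < Nat.find hex := lt_of_le_of_ne h2 he
      have hne : pvT P R cnt ≠ "abcdefghijklmnop".toList := by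
        intro hcontra
        exact Nat.find_min hex hlt ⟨h1, by rw [hcontra, pvBase_lit]⟩
      rw [loopA, if_pos (Or.inl hne), pvT_succ hP hR hdance cnt, Option.bind_some]
      exact ih (cnt + 1) _ (by omega) (by omega) (by omega)

-- B-side power correctness
theorem comp_bounded {p q : List Int} (hp : pvBounded p) (hq : pvBounded q) :
    pvBounded (compPerm p q) := by
  refine ⟨by simp [compPerm, hq.1], ?_⟩
  intro x hx
  simp only [compPerm, List.mem_map] at hx
  obtain ⟨v, hv, rfl⟩ := hx
  exact pvF_bounds hp v

theorem comp_sem {p q : List Int} (_hp : pvBounded p) (hq : pvBounded q) {v : Int}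
    (h0 : 0 ≤ v) (h1 : v < 16) : pvF (compPerm p q) v = pvF p (pvF q v) := by
  unfold compPerm
  exact pvF_map hq.1 _ h0 h1

theorem iterate_congrOn {f g : Int → Int} (hg : pvGood g)
    (hfg : ∀ v : Int, 0 ≤ v → v < 16 → f v = g v) :
    ∀ (n : Nat) (v : Int), 0 ≤ v → v < 16 → f^[n] v = g^[n] v := by
  intro n
  induction n with
  | zero => intro v _ _; rfl
  | succ n ihn =>
    intro v h0 h1
    rw [Function.iterate_succ_apply, Function.iterate_succ_apply, hfg v h0 h1]
    have := hg v h0 h1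
    exact ihn _ this.1 this.2

theorem powGo_sem : ∀ (n : Nat) (r p : List Int), pvBounded r → pvBounded p →
    pvBounded (powGo r p n) ∧
      ∀ v : Int, 0 ≤ v → v < 16 → pvF (powGo r p n) v = pvF r ((pvF p)^[n] v) := by
  intro n
  induction n using Nat.strong_induction_on with
  | _ n ih =>
    intro r p hr hp
    by_cases h0 : n = 0
    · subst h0
      constructor
      · rw [powGo]
        simpa using hr
      · intro v _ _
        rw [powGo]
        simp
    · rw [powGo, if_neg h0]
      have hhalf : n >>> 1 < n := by
        rw [Nat.shiftRight_one]
        omega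
      obtain ⟨hB, hsem⟩ := ih (n >>> 1) hhalf (if n &&& 1 = 1 then compPerm r p else r)
        (compPerm p p)
        (by split_ifs; exacts [comp_bounded hr hp, hr]) (comp_bounded hp hp)
      refine ⟨hB, ?_⟩
      intro v h0v h1v
      rw [hsem v h0v h1v]
      have hgood2 : pvGood (pvF p ∘ pvF p) := by
        intro w hw0 hw1
        exact pvF_bounds hp _
      have hq := iterate_congrOn hgood2 (fun w hw0 hw1 => comp_sem hp hp hw0 hw1)
        (n >>> 1) v h0v h1v
      rw [hq]
      have h2 : (pvF p)^[2] = pvF p ∘ pvF p := by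
        rw [Function.iterate_succ, Function.iterate_one]
      have hiter : (pvF p ∘ pvF p)^[n >>> 1] v = (pvF p)^[2 * (n >>> 1)] v := by
        rw [Function.iterate_mul, h2]
      rw [hiter]
      have hmod : n &&& 1 = n % 2 := Nat.and_one_is_mod n
      have hdiv : n >>> 1 = n / 2 := Nat.shiftRight_one n
      split_ifs with hodd
      · have hw := pvGood_iterate (pvF_good hp) (2 * (n >>> 1)) v h0v h1v
        rw [comp_sem hr hp hw.1 hw.2, ← Function.iterate_succ_apply' (pvF p)]
        have hfin : (2 * (n >>> 1)).succ = n := by omega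
        rw [hfin]
      · have : 2 * (n >>> 1) = n := by omega
        rw [this]

set_option maxRecDepth 8192 in
theorem base_getD : ∀ m : Nat, m < 16 → pvBase.getD m 'a' = pvChr (m : Int) := by decide
set_option maxRecDepth 8192 in
theorem pvStart_eq :
    ((PySem.List.pyRange 97 113 1).map (fun i => Char.ofNat i.toNat)) = pvBase := by decide

theorem pyGetD_is_pvF (L : List Int) (v : Int) : PySem.List.pyGetD L v 0 = pvF L v := rfl

theorem alt_list_eq {P R : List Int} (hP : pvValidL P) (hR : pvValidL R) :
    ((List.range 16).map fun (i : Nat) =>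
      Char.ofNat (97 + (PySem.List.pyGetD (powGo ident16 R 1000000000)
        (PySem.List.pyGetD (powGo ident16 P 1000000000) (i : Int) 0) 0).toNat))
      = pvT P R 1000000000 := by
  obtain ⟨hPB, hPsem⟩ := powGo_sem 1000000000 ident16 P valid_ident.1 hP.1
  obtain ⟨hRB, hRsem⟩ := powGo_sem 1000000000 ident16 R valid_ident.1 hR.1
  apply List.ext_getElem (by
    rw [List.length_map, List.length_range]
    exact (length_pvApplyF _ _ _).symm)
  intro n h1 h2
  have hn : n < 16 := by simpa using h1
  rw [List.getElem_map, List.getElem_range]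
  have hrhs : (pvT P R 1000000000)[n]'h2
      = pvChr ((pvF R)^[1000000000]
          (pvIdx (pvBase.getD (((pvF P)^[1000000000]) (n : Int)).toNat 'a'))) :=
    getElem_pvApplyF _ _ _ hn
  rw [hrhs]
  have hiP := pvGood_iterate (pvF_good hP.1) 1000000000 (n : Int) (by positivity)
    (by exact_mod_cast hn)
  have hiR := pvGood_iterate (pvF_good hR.1) 1000000000 _ hiP.1 hiP.2
  rw [pyGetD_is_pvF, pyGetD_is_pvF]
  rw [hPsem (n : Int) (by positivity) (by exact_mod_cast hn), pvF_ident hiP.1 hiP.2]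
  rw [hRsem _ hiP.1 hiP.2, pvF_ident hiR.1 hiR.2]
  rw [base_getD ((pvF P)^[1000000000] (n : Int)).toNat (by omega)]
  rw [show ((((pvF P)^[1000000000] (n : Int)).toNat : Nat) : Int)
      = (pvF P)^[1000000000] (n : Int) from by omega]
  rw [pvIdx_chr _ hiP.1 hiP.2]
  rfl


-- ===== VERDICT (by name: the statement is the Claim_ definition above) =====
theorem part2_spec : Claim_equal_part2 := by
  intro lines hdom hpre
  unfold Spec_part2
  obtain ⟨hnil, hparts⟩ := hpre
  have hne : ∀ part ∈ PySem.Chars.splitOn ((lines.headD "").toList) [','], part ≠ [] :=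
    fun p hp => (hparts p hp).1
  obtain ⟨P, R, hfold, hP, hR, hdance'⟩ :=
    fold_decomp _ hparts ident16 ident16 valid_ident valid_ident
  have hdance : ∀ t, pvInv t →
      danceA ((PySem.Chars.splitOn ((lines.headD "").toList) [',']).map pvInstrOf) t
        = some (pvApplyF (pvF P) (pvF R) t) := by
    intro t ht
    have h := hdance' t ht
    rwa [applyF_id_on (fun n hn => pvF_ident_nat n hn)
      (fun v h0 h1 => pvF_ident h0 h1) ht] at h
  have hex : ∃ m, 0 < m ∧ pvT P R m = pvBase :=
    ⟨20922789888000, by norm_num, exists_period hP hR⟩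
  have hrpos : 0 < Nat.find hex := (Nat.find_spec hex).1
  have hrle : Nat.find hex ≤ 20922789888000 :=
    Nat.find_le ⟨by norm_num, exists_period hP hR⟩
  have hTr : pvT P R (Nat.find hex) = pvBase := (Nat.find_spec hex).2
  -- evaluate A
  unfold part2
  rw [parseA_eq hnil hne]
  dsimp only
  rw [pvStart_eq, show (20922789888002 : Nat) = 20922789888001 + 1 from by norm_num,
    loopA, if_pos (Or.inr rfl),
    show danceA ((PySem.Chars.splitOn ((lines.headD "").toList) [',']).map pvInstrOf) pvBase
        = some (pvT P R 1) from by
      have h := pvT_succ hP hR hdance 0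
      rwa [pvT_zero] at h,
    Option.bind_some]
  rw [show (0 + 1 : Nat) = 1 from rfl]
  rw [loop_ret hP hR hdance hex 20922789888001 1 ([] ++ [pvBase]) (by omega) (by omega)
    (by omega)]
  dsimp only
  rw [danceN_T hP hR hdance (Nat.find hex) (1000000000 % Nat.find hex)]
  dsimp only
  rw [show Nat.find hex + 1000000000 % Nat.find hex
      = 1000000000 % Nat.find hex + Nat.find hex from Nat.add_comm _ _,
    pvT_add_period hP hR hTr]
  -- evaluate B
  unfold part2_alt
  rw [pyGet?_zero_of_ne_nil hnil "", Option.bind_some, hfold]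
  dsimp only
  rw [alt_list_eq hP hR, pvT_mod hP hR hTr 1000000000]
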